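-- pv_equiv track=rewrite | github.com/BoltNinja/crosswords | xword2RD.py | valid_original
-- ===== SOURCE A (Python) =====
-- def valid_original(board, height, width):
--     num_letters = 0
--     num_blocks = 0
--     visited = [[False for _ in range(width)] for _ in range(height)]
--     # Count number of letters and blocking squares
--     for ch in board:
--         if ch == "-":
--             num_letters += 1
--         elif ch == "#":
--             num_blocks += 1
--     # Check if there are any isolated regions of non-blocking squares
--     num_connected_regions = 0
--     for i in range(height):
--         for j in range(width):
--             if board[i*width + j] == "-" and not visited[i][j]:
--                 num_connected_regions += 1
--                 dfs(board, visited, i, j, height, width)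
--     if num_connected_regions > 1:
--         return False
--     # Check each letter appears in at least two words
--     hor_found = [[False for _ in range(width)] for _ in range(height)]
--     ver_found = [[False for _ in range(width)] for _ in range(height)]
--     for i in range(height):
--         for j in range(width):
--             if board[i*width + j] != "#":
--                 if (j == 0 or board[i*width + j - 1] == "#") and (j < width - 2 and board[i*width + j + 1] != "-" and board[i*width + j + 2] != "#"):
--                     hor_found[i][j] = True
--                 if (i == 0 or board[(i-1)*width + j] == "#") and (i < height - 2 and board[(i+1)*width + j] != "-" and board[(i+2)*width + j] != "#"):
--                     ver_found[i][j] = True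
--     for i in range(height):
--         for j in range(width):
--             if board[i*width + j] != "#" and (not hor_found[i][j] or not ver_found[i][j]):
--                 return False
--     # Check each word is at least 3 characters long
--     for i in range(height):
--         for j in range(width):
--             if (j == 0 or board[i*width + j - 1] == "#") and (j < width - 2 and board[i*width + j + 1] != "-" and board[i*width + j + 2] != "#"):
--                 length = 1
--                 for k in range(j + 1, width):
--                     if board[i*width + k] != "#":
--                         length += 1
--                     else:
--                         break
--                 if length < 3:
--                     return False
--             if (i == 0 or board[(i-1)*width + j] == "#") and (i < height - 2 and board[(i+1)*width + j] != "-" and board[(i+2)*width + j] != "#"):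
--                 length = 1
--                 for k in range(i + 1, height):
--                     if board[k*width + j] != "#":
--                         length += 1
--                     else:
--                         break
--                 if length < 3:
--                     return False
--     # Check blocking square structure has 180 degree symmetry
--     for i in range(height):
--         for j in range(width):
--             if board[i*width + j] == "#":
--                 mirr_i = height -1-i
--                 mirr_j = width - 1 - j
--                 if board[mirr_i*width + mirr_j] != "#":
--                     return False
--     return True
--
-- def dfs(board, visited, i, j, height, width):
--     visited[i][j] = True
--     if i > 0 and not visited[i-1][j] and board[(i-1)*width + j] == "-":
--         dfs(board, visited, i-1, j, height, width)
--     if j > 0 and not visited[i][j-1] and board[i*width + j - 1] == "-":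
--         dfs(board, visited, i, j-1, height, width)
--     if i < height-1 and not visited[i+1][j] and board[(i+1)*width + j] == "-":
--         dfs(board, visited, i+1, j, height, width)
--     if j < width-1 and not visited[i][j+1] and board[i*width + j + 1] == "-":
--         dfs(board, visited, i, j+1, height, width)
-- ===== SOURCE B (Python) =====
-- def valid_original(board, height, width):
--     n = height * width
--     # Connectivity: count connected '-' regions with an iterative, stack-based
--     # flood fill over a visited set, seeded from a single flat-index scan.
--     visited = set()
--     regions = 0
--     for t in range(n):
--         i, j = divmod(t, width)
--         if board[t] == "-" and (i, j) not in visited: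
--             regions += 1
--             stack = [(i, j)]
--             while stack:
--                 ci, cj = stack.pop()
--                 if (ci, cj) in visited:
--                     continue
--                 visited.add((ci, cj))
--                 for ni, nj in ((ci, cj + 1), (ci + 1, cj), (ci, cj - 1), (ci - 1, cj)):
--                     if 0 <= ni < height and 0 <= nj < width and board[ni * width + nj] == "-":
--                         stack.append((ni, nj))
--     if regions > 1:
--         return False
--     # One flat pass checks everything else per cell: the word-start flags are
--     # computed inline (no hor_found/ver_found matrices), the minimum-length-3
--     # scan collapses to an O(1) look at the next cell (the start guard already
--     # inspected the cell two steps ahead), and the symmetry mirror of flat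
--     # index t is n-1-t.
--     for t in range(n):
--         i, j = divmod(t, width)
--         h_ok = (j == 0 or board[t - 1] == "#") and \
--             (j < width - 2 and board[t + 1] != "-" and board[t + 2] != "#")
--         v_ok = (i == 0 or board[t - width] == "#") and \
--             (i < height - 2 and board[t + width] != "-" and board[t + 2 * width] != "#")
--         if board[t] != "#" and not (h_ok and v_ok):
--             return False
--         if h_ok and board[t + 1] == "#":
--             return False
--         if v_ok and board[t + width] == "#":
--             return False
--         if board[t] == "#" and board[n - 1 - t] != "#":
--             return False
--     return True
-- ===== Notes on version B (the rewrite author's own statement) =====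
-- stated objective: alternative
-- what changed: Connectivity is computed by an iterative stack-based flood fill over a visited set instead of recursive dfs on a matrix, and all remaining checks collapse into ONE flat pass over t in range(height*width): the hor/ver word-start flags are computed inline (no hor_found/ver_found matrices), the O(width)/O(height) word-length scans become an O(1) look at the next cell, the symmetry mirror is n-1-t, and A's dead letter/block counters are removed.
-- outside the precondition, e.g. on valid_original('', 2, 3): A raises IndexError, B raises IndexError; on valid_original('------', -2, -3): A returns True, B returns False
import Mathlib
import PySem

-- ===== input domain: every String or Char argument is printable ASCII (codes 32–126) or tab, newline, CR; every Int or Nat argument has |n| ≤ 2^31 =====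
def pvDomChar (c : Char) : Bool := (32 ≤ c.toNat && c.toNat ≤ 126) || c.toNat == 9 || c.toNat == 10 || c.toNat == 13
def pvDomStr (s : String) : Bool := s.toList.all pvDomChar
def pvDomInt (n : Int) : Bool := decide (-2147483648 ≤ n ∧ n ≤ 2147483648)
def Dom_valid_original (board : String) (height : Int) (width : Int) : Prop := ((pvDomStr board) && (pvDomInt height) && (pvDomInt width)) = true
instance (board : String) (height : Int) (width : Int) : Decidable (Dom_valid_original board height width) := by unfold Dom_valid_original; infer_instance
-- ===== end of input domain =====

-- B replaces A's recursive dfs by an iterative stack flood fill over a visited set and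
-- collapses A's remaining four nested-loop passes into ONE flat pass over t in
-- range(height*width) (word-start flags inline instead of hor_found/ver_found matrices,
-- the word-length scans become an O(1) look at the next cell, the symmetry mirror is
-- n-1-t); equivalence is about the returned value (neither mutates its arguments).

-- ===== PORT A =====

-- board[idx] (indices are in range on Pre_ inputs; getD is never taken there)
def pvAt (board : String) (idx : Int) : Char := (PySem.Str.pyGet? board idx).getD ' '

-- A's recursive dfs; visited matrix ported as the list of True positions (appended in
-- marking order); fuel is a totality guard only (recursion depth is bounded by the
-- number of unvisited cells, see dfsA_fuel below)
def dfsA (board : String) (height width : Int) : Nat → Int → Int → List (Int × Int) → List (Int × Int)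
  | 0, _, _, v => v
  | f+1, i, j, v =>
    let v0 := v ++ [(i, j)]
    let v1 := if decide (0 < i) && !(v0.contains (i-1, j)) && (pvAt board ((i-1)*width + j) == '-') then
                dfsA board height width f (i-1) j v0 else v0
    let v2 := if decide (0 < j) && !(v1.contains (i, j-1)) && (pvAt board (i*width + (j-1)) == '-') then
                dfsA board height width f i (j-1) v1 else v1
    let v3 := if decide (i < height - 1) && !(v2.contains (i+1, j)) && (pvAt board ((i+1)*width + j) == '-') then
                dfsA board height width f (i+1) j v2 else v2
    let v4 := if decide (j < width - 1) && !(v3.contains (i, j+1)) && (pvAt board (i*width + (j+1)) == '-') then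
                dfsA board height width f i (j+1) v3 else v3
    v4

-- the region-counting double loop: state (num_connected_regions, visited)
def regA (board : String) (height width : Int) : Int × List (Int × Int) :=
  (PySem.List.pyRange 0 height 1).foldl (fun st i =>
    (PySem.List.pyRange 0 width 1).foldl (fun st j =>
      if (pvAt board (i*width + j) == '-') && !(st.2.contains (i, j)) then
        (st.1 + 1, dfsA board height width (height.toNat * width.toNat + 1) i j st.2)
      else st) st) ((0 : Int), ([] : List (Int × Int)))

-- hor_found / ver_found matrices, ported as lists of True positions
def horA (board : String) (height width : Int) : List (Int × Int) :=
  (PySem.List.pyRange 0 height 1).foldl (fun acc i =>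
    (PySem.List.pyRange 0 width 1).foldl (fun acc j =>
      if !(pvAt board (i*width + j) == '#') &&
         ((j == 0 || pvAt board (i*width + j - 1) == '#') &&
          (decide (j < width - 2) && !(pvAt board (i*width + j + 1) == '-') && !(pvAt board (i*width + j + 2) == '#'))) then
        acc ++ [(i, j)] else acc) acc) []

def verA (board : String) (height width : Int) : List (Int × Int) :=
  (PySem.List.pyRange 0 height 1).foldl (fun acc i =>
    (PySem.List.pyRange 0 width 1).foldl (fun acc j =>
      if !(pvAt board (i*width + j) == '#') &&
         ((i == 0 || pvAt board ((i-1)*width + j) == '#') &&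
          (decide (i < height - 2) && !(pvAt board ((i+1)*width + j) == '-') && !(pvAt board ((i+2)*width + j) == '#'))) then
        acc ++ [(i, j)] else acc) acc) []

def pass2A (board : String) (height width : Int) : Bool :=
  (PySem.List.pyRange 0 height 1).all (fun i =>
    (PySem.List.pyRange 0 width 1).all (fun j =>
      if !(pvAt board (i*width + j) == '#') then
        (horA board height width).contains (i, j) && (verA board height width).contains (i, j)
      else true))

-- A's length scan with break ('for k in range(j+1, width): … else: break')
def scanA (ok : Int → Bool) : List Int → Int → Int
  | [], len => len
  | k :: ks, len => if ok k then scanA ok ks (len + 1) else len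

def pass3A (board : String) (height width : Int) : Bool :=
  (PySem.List.pyRange 0 height 1).all (fun i =>
    (PySem.List.pyRange 0 width 1).all (fun j =>
      (if (j == 0 || pvAt board (i*width + j - 1) == '#') &&
          (decide (j < width - 2) && !(pvAt board (i*width + j + 1) == '-') && !(pvAt board (i*width + j + 2) == '#')) then
         decide (¬ (scanA (fun k => !(pvAt board (i*width + k) == '#')) (PySem.List.pyRange (j+1) width 1) 1 < 3))
       else true)
      &&
      (if (i == 0 || pvAt board ((i-1)*width + j) == '#') &&
          (decide (i < height - 2) && !(pvAt board ((i+1)*width + j) == '-') && !(pvAt board ((i+2)*width + j) == '#')) then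
         decide (¬ (scanA (fun k => !(pvAt board (k*width + j) == '#')) (PySem.List.pyRange (i+1) height 1) 1 < 3))
       else true)))

def pass4A (board : String) (height width : Int) : Bool :=
  (PySem.List.pyRange 0 height 1).all (fun i =>
    (PySem.List.pyRange 0 width 1).all (fun j =>
      if pvAt board (i*width + j) == '#' then
        pvAt board ((height - 1 - i)*width + (width - 1 - j)) == '#'
      else true))

def valid_original (board : String) (height : Int) (width : Int) : Bool :=
  -- A's (unused) letter/block counting loop
  let _counts := board.toList.foldl (fun (p : Int × Int) ch =>
    if ch == '-' then (p.1 + 1, p.2) else if ch == '#' then (p.1, p.2 + 1) else p) ((0 : Int), (0 : Int))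
  if (regA board height width).1 > 1 then false
  else pass2A board height width && pass3A board height width && pass4A board height width

-- ===== PORT B =====

-- board[t] (Source B indexes by a flat index t only)
def charB (board : String) (t : Int) : Char := (PySem.Str.pyGet? board t).getD ' '

-- in-grid open ('-') cell — the push condition of Source B's flood fill
def openC (board : String) (height width : Int) (n : Int × Int) : Bool :=
  decide (0 ≤ n.1) && decide (n.1 < height) && decide (0 ≤ n.2) && decide (n.2 < width) &&
  (charB board (n.1*width + n.2) == '-')

-- neighbours in pop order (Python pushes right,down,left,up and pops from the end)
def neighC (board : String) (height width : Int) (c : Int × Int) : List (Int × Int) :=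
  [(c.1 - 1, c.2), (c.1, c.2 - 1), (c.1 + 1, c.2), (c.1, c.2 + 1)].filter (openC board height width)

-- iterative flood fill: stack with its top at the head; visited is a PySem.Set
def floodC (board : String) (height width : Int) : Nat → List (Int × Int) → List (Int × Int) → List (Int × Int)
  | 0, _, v => v
  | _+1, [], v => v
  | f+1, c :: s, v =>
    if v.contains c then floodC board height width f s v
    else floodC board height width f (neighC board height width c ++ s) (PySem.Set.add v c)

-- Source B's first flat loop: seed a flood fill at every unvisited '-' cell
def regC (board : String) (height width : Int) : Int × List (Int × Int) :=
  (PySem.List.pyRange 0 (height*width) 1).foldl (fun st t =>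
    if (charB board t == '-') && !(st.2.contains (PySem.Int.floordiv t width, PySem.Int.mod t width)) then
      (st.1 + 1, floodC board height width (5 * (height.toNat * width.toNat) + 2)
        [(PySem.Int.floordiv t width, PySem.Int.mod t width)] st.2)
    else st) ((0 : Int), ([] : List (Int × Int)))

-- Source B's second flat loop, one cell: all four per-cell checks (each 'return False'
-- becomes a negated conjunct)
def cellOkB (board : String) (height width : Int) (t : Int) : Bool :=
  let i := PySem.Int.floordiv t width
  let j := PySem.Int.mod t width
  let hok := (j == 0 || charB board (t - 1) == '#') &&
    (decide (j < width - 2) && !(charB board (t + 1) == '-') && !(charB board (t + 2) == '#'))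
  let vok := (i == 0 || charB board (t - width) == '#') &&
    (decide (i < height - 2) && !(charB board (t + width) == '-') && !(charB board (t + 2*width) == '#'))
  (!(!(charB board t == '#') && !(hok && vok))) &&
  (!(hok && (charB board (t + 1) == '#'))) &&
  (!(vok && (charB board (t + width) == '#'))) &&
  (!((charB board t == '#') && !(charB board (height*width - 1 - t) == '#')))

def valid_original_alt (board : String) (height : Int) (width : Int) : Bool :=
  if (regC board height width).1 > 1 then false
  else (PySem.List.pyRange 0 (height*width) 1).all (cellOkB board height width)

-- ===== PRECONDITION & SPEC =====

-- Pre_ excludes boards shorter than the height*width grid (there both Pythons raise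
-- IndexError) and the degenerate inputs with BOTH dimensions negative (the product is
-- positive though the grid is meaningless; no behaviour is specified there — A's empty
-- loops and B's flat scan are equally arbitrary, and B raises on short boards there).
def Pre_valid_original (board : String) (height : Int) (width : Int) : Prop :=
  (0 < height → 0 < width → height * width ≤ (board.length : Int)) ∧ (0 ≤ height ∨ 0 ≤ width)
instance (board : String) (height : Int) (width : Int) : Decidable (Pre_valid_original board height width) := by
  unfold Pre_valid_original; infer_instance

def pvWitness_valid_original : String × Int × Int := ("--#---#--", 3, 3)

def Spec_valid_original (board : String) (height : Int) (width : Int) (out : Bool) : Prop := out = valid_original_alt board height width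
instance (board : String) (height : Int) (width : Int) (out : Bool) : Decidable (Spec_valid_original board height width out) := by unfold Spec_valid_original; infer_instance

-- ===== CLAIM (what is proved, stated in full; the proofs are below) =====
def Claim_equal_valid_original : Prop := ∀ (board : String) (height : Int) (width : Int), Dom_valid_original board height width → Pre_valid_original board height width → Spec_valid_original board height width (valid_original board height width)

-- ===== LEMMAS AND PROOFS =====

lemma charB_eq : ∀ (b : String) (t : Int), charB b t = pvAt b t := fun _ _ => rfl

-- the list of grid cells, row-major
def gridL (height width : Int) : List (Int × Int) :=
  (PySem.List.pyRange 0 height 1).flatMap (fun i => (PySem.List.pyRange 0 width 1).map (fun j => (i, j)))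

-- number of grid cells not yet visited
def unvis (height width : Int) (v : List (Int × Int)) : Nat :=
  ((gridL height width).filter (fun c => !(v.contains c))).length

lemma mem_gridL {height width : Int} {c : Int × Int} :
    c ∈ gridL height width ↔ (0 ≤ c.1 ∧ c.1 < height) ∧ (0 ≤ c.2 ∧ c.2 < width) := by
  obtain ⟨a, b⟩ := c
  simp [gridL, List.mem_flatMap, PySem.List.mem_pyRange_one]

lemma gridL_length (height width : Int) : (gridL height width).length = height.toNat * width.toNat := by
  simp [gridL, List.length_flatMap, PySem.List.length_pyRange_one]

lemma unvis_le (height width : Int) (v : List (Int × Int)) :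
    unvis height width v ≤ height.toNat * width.toNat := by
  calc unvis height width v ≤ (gridL height width).length := List.length_filter_le _ _
  _ = _ := gridL_length height width

lemma unvis_mono {height width : Int} {v v' : List (Int × Int)}
    (h : ∀ x, v.contains x = true → v'.contains x = true) :
    unvis height width v' ≤ unvis height width v := by
  unfold unvis
  rw [← List.countP_eq_length_filter, ← List.countP_eq_length_filter]
  apply List.countP_mono_left
  intro x _ hx
  simp only [Bool.not_eq_true'] at hx ⊢
  cases hv : v.contains x
  · rfl
  · exact absurd (h x hv) (by simp only [Bool.not_eq_true] at hx ⊢; exact hx)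

-- strict decrease when a fresh grid cell is appended
lemma countP_lt_of_mem {α : Type} {p q : α → Bool} {l : List α} {a : α}
    (hmono : ∀ x ∈ l, p x = true → q x = true) (ha : a ∈ l) (hq : q a = true) (hp : p a = false) :
    l.countP p < l.countP q := by
  induction l with
  | nil => simp at ha
  | cons b l ih =>
    rcases List.mem_cons.mp ha with hab | ha
    · subst hab
      have := List.countP_mono_left (p := p) (q := q) (l := l)
        (fun x hx => hmono x (List.mem_cons_of_mem _ hx))
      rw [List.countP_cons, List.countP_cons]
      simp [hp, hq]
      omega
    · have := ih (fun x hx => hmono x (List.mem_cons_of_mem _ hx)) ha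
      rw [List.countP_cons, List.countP_cons]
      have hb : p b = true → q b = true := hmono b (by simp)
      cases hpb : p b <;> cases hqb : q b <;> simp_all <;> omega

lemma unvis_append_lt {height width : Int} {v : List (Int × Int)} {c : Int × Int}
    (hin : c ∈ gridL height width) (hc : v.contains c = false) :
    unvis height width (v ++ [c]) < unvis height width v := by
  have hcm : c ∉ v := by simpa using hc
  unfold unvis
  rw [← List.countP_eq_length_filter, ← List.countP_eq_length_filter]
  refine countP_lt_of_mem ?_ hin ?_ ?_
  · intro x _ hx
    simp only [Bool.not_eq_true'] at hx ⊢
    simp only [List.contains_append, Bool.or_eq_false_iff] at hx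
    exact hx.1
  · simpa using hc
  · simp

lemma dfsA_mono {board : String} {height width : Int} :
    ∀ (f : Nat) (i j : Int) (v : List (Int × Int)) (x : Int × Int),
      v.contains x = true → (dfsA board height width f i j v).contains x = true := by
  intro f
  induction f with
  | zero => intro i j v x h; simpa [dfsA] using h
  | succ f ih =>
    intro i j v x h
    simp only [dfsA]
    have gen : ∀ (b : Bool) (i' j' : Int) (v' : List (Int × Int)),
        v'.contains x = true →
        (if b then dfsA board height width f i' j' v' else v').contains x = true := by
      intro b i' j' v' hv
      split
      · exact ih _ _ _ _ hv
      · exact hv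
    apply gen
    apply gen
    apply gen
    apply gen
    simp only [List.contains_append, h, Bool.true_or]

-- bound-check part of openC
lemma openC_iff {board : String} {height width : Int} {i j : Int} :
    openC board height width (i, j) = true ↔
      (0 ≤ i ∧ i < height ∧ 0 ≤ j ∧ j < width ∧ (pvAt board (i*width + j) == '-') = true) := by
  simp [openC, charB_eq, and_assoc]

lemma dfsA_fuel {board : String} {height width : Int} :
    ∀ (k f1 f2 : Nat) (i j : Int) (v : List (Int × Int)),
      k ≤ f1 → k ≤ f2 → unvis height width v ≤ k →
      openC board height width (i, j) = true → v.contains (i, j) = false →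
      dfsA board height width f1 i j v = dfsA board height width f2 i j v := by
  intro k
  induction k with
  | zero =>
    intro f1 f2 i j v _ _ hu hg hc
    exfalso
    have hin : (i, j) ∈ gridL height width := by
      rw [openC_iff] at hg
      exact mem_gridL.mpr ⟨⟨hg.1, hg.2.1⟩, ⟨hg.2.2.1, hg.2.2.2.1⟩⟩
    have := unvis_append_lt (v := v) hin hc
    omega
  | succ k ih =>
    intro f1 f2 i j v hf1 hf2 hu hg hc
    obtain ⟨f1', rfl⟩ : ∃ n, f1 = n + 1 := ⟨f1 - 1, by omega⟩
    obtain ⟨f2', rfl⟩ : ∃ n, f2 = n + 1 := ⟨f2 - 1, by omega⟩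
    rw [openC_iff] at hg
    have hin : (i, j) ∈ gridL height width :=
      mem_gridL.mpr ⟨⟨hg.1, hg.2.1⟩, ⟨hg.2.2.1, hg.2.2.2.1⟩⟩
    have hu0 : unvis height width (v ++ [(i, j)]) ≤ k := by
      have := unvis_append_lt (v := v) hin hc
      omega
    -- one conditional step taken with each of the two fuels gives equal states
    have step : ∀ (b : Bool) (i' j' : Int) (v' : List (Int × Int)),
        unvis height width v' ≤ k →
        (b = true → 0 ≤ i' ∧ i' < height ∧ 0 ≤ j' ∧ j' < width) →
        (if b && !(v'.contains (i', j')) && (pvAt board (i'*width + j') == '-') then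
            dfsA board height width f1' i' j' v' else v')
        = (if b && !(v'.contains (i', j')) && (pvAt board (i'*width + j') == '-') then
            dfsA board height width f2' i' j' v' else v') := by
      intro b i' j' v' hu' hb
      by_cases hcond : (b && !(v'.contains (i', j')) && (pvAt board (i'*width + j') == '-')) = true
      · rw [if_pos hcond, if_pos hcond]
        simp only [Bool.and_eq_true, Bool.not_eq_true'] at hcond
        obtain ⟨⟨hbb, hcc⟩, hat⟩ := hcond
        refine ih f1' f2' i' j' v' (by omega) (by omega) hu' ?_ hcc
        rw [openC_iff]
        obtain ⟨h1, h2, h3, h4⟩ := hb hbb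
        exact ⟨h1, h2, h3, h4, hat⟩
      · rw [if_neg hcond, if_neg hcond]
    -- a conditional step only grows the visited set
    have sub : ∀ (fu : Nat) (b : Bool) (i' j' : Int) (v' : List (Int × Int)) (x : Int × Int),
        v'.contains x = true →
        (if b && !(v'.contains (i', j')) && (pvAt board (i'*width + j') == '-') then
            dfsA board height width fu i' j' v' else v').contains x = true := by
      intro fu b i' j' v' x hv
      split
      · exact dfsA_mono _ _ _ _ _ hv
      · exact hv
    simp only [dfsA]
    set v0 := v ++ [(i, j)] with hv0
    have e1 := step (decide (0 < i)) (i-1) j v0 hu0 (by intro hbb; simp at hbb; omega)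
    rw [← e1]
    set v1 := (if decide (0 < i) && !(v0.contains (i-1, j)) && (pvAt board ((i-1)*width + j) == '-') then
        dfsA board height width f1' (i-1) j v0 else v0) with hv1
    have hu1 : unvis height width v1 ≤ k :=
      le_trans (unvis_mono (fun x hx => by rw [hv1]; exact sub _ _ _ _ _ _ hx)) hu0
    have e2 := step (decide (0 < j)) i (j-1) v1 hu1 (by intro hbb; simp at hbb; omega)
    rw [← e2]
    set v2 := (if decide (0 < j) && !(v1.contains (i, j-1)) && (pvAt board (i*width + (j-1)) == '-') then
        dfsA board height width f1' i (j-1) v1 else v1) with hv2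
    have hu2 : unvis height width v2 ≤ k :=
      le_trans (unvis_mono (fun x hx => by rw [hv2]; exact sub _ _ _ _ _ _ hx)) hu1
    have e3 := step (decide (i < height - 1)) (i+1) j v2 hu2 (by intro hbb; simp at hbb; omega)
    rw [← e3]
    set v3 := (if decide (i < height - 1) && !(v2.contains (i+1, j)) && (pvAt board ((i+1)*width + j) == '-') then
        dfsA board height width f1' (i+1) j v2 else v2) with hv3
    have hu3 : unvis height width v3 ≤ k :=
      le_trans (unvis_mono (fun x hx => by rw [hv3]; exact sub _ _ _ _ _ _ hx)) hu2
    exact step (decide (j < width - 1)) i (j+1) v3 hu3 (by intro hbb; simp at hbb; omega)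

-- fold the stack through conditional dfsA calls (proof-side description of floodC)
def foldD (board : String) (height width : Int) (v : List (Int × Int)) (s : List (Int × Int)) : List (Int × Int) :=
  s.foldl (fun v c => if v.contains c then v
                      else dfsA board height width (unvis height width v + 1) c.1 c.2 v) v

-- one A-side conditional dfs step (direction bound b, neighbour cell n)
def stepAfn (board : String) (height width : Int) (fu : Nat)
    (v' : List (Int × Int)) (p : Bool × (Int × Int)) : List (Int × Int) :=
  if p.1 && !(v'.contains p.2) && (pvAt board (p.2.1*width + p.2.2) == '-') then
    dfsA board height width fu p.2.1 p.2.2 v' else v'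

-- one B-side (foldD) step
def stepDfn (board : String) (height width : Int)
    (v' : List (Int × Int)) (n : Int × Int) : List (Int × Int) :=
  if openC board height width n then
    (if v'.contains n then v'
     else dfsA board height width (unvis height width v' + 1) n.1 n.2 v') else v'

lemma dfsA_succ_eq_foldl (board : String) (height width : Int) (f : Nat) (i j : Int)
    (v : List (Int × Int)) :
    dfsA board height width (f+1) i j v =
      [(decide (0 < i), (i-1, j)), (decide (0 < j), (i, j-1)),
       (decide (i < height - 1), (i+1, j)), (decide (j < width - 1), (i, j+1))].foldl
        (stepAfn board height width f) (v ++ [(i, j)]) := rfl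

lemma foldD_eq_foldl_stepDfn (board : String) (height width : Int)
    (v0 : List (Int × Int)) (c : Int × Int) :
    foldD board height width v0 (neighC board height width c) =
      [(c.1 - 1, c.2), (c.1, c.2 - 1), (c.1 + 1, c.2), (c.1, c.2 + 1)].foldl
        (stepDfn board height width) v0 := by
  rw [foldD, neighC, List.foldl_filter]
  rfl

lemma stepDfn_mono {board : String} {height width : Int} {v' : List (Int × Int)}
    {n : Int × Int} {x : Int × Int} (hx : v'.contains x = true) :
    (stepDfn board height width v' n).contains x = true := by
  rw [stepDfn]
  split
  · split
    · exact hx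
    · exact dfsA_mono _ _ _ _ _ hx
  · exact hx

-- one conditional A-step equals one foldD step (enough global fuel U)
lemma stepA_eq_stepD {board : String} {height width : Int} {U : Nat}
    (b : Bool) (i' j' : Int) (v' : List (Int × Int))
    (hle : unvis height width v' + 1 ≤ U)
    (hb : b = true ↔ (0 ≤ i' ∧ i' < height ∧ 0 ≤ j' ∧ j' < width)) :
    stepAfn board height width U v' (b, (i', j')) = stepDfn board height width v' (i', j') := by
  rw [stepAfn, stepDfn]
  by_cases hcont : v'.contains (i', j') = true
  · have hm := List.contains_iff_mem.mp hcont
    rw [if_neg (by simp [hm])]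
    split
    · simp
    · simp
  · rw [Bool.not_eq_true] at hcont
    by_cases hat : (pvAt board (i'*width + j') == '-') = true
    · by_cases hbb : b = true
      · have hopen : openC board height width (i', j') = true := by
          rw [openC_iff]
          obtain ⟨hh1, hh2, hh3, hh4⟩ := hb.mp hbb
          exact ⟨hh1, hh2, hh3, hh4, hat⟩
        have hm' : (i', j') ∉ v' := by simpa using hcont
        rw [if_pos (by simp [hbb, hm', hat]), if_pos hopen, if_neg (by simpa using hcont)]
        exact dfsA_fuel (unvis height width v' + 1) _ _ _ _ _ hle le_rfl (by omega) hopen hcont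
      · rw [if_neg (by simp [hbb]), if_neg ?_]
        rw [openC_iff]
        intro ⟨hh1, hh2, hh3, hh4, _⟩
        exact hbb (hb.mpr ⟨hh1, hh2, hh3, hh4⟩)
    · rw [if_neg (by simp [hat]), if_neg (by rw [openC_iff]; intro h; exact hat h.2.2.2.2)]

lemma chainA_eq_chainD {board : String} {height width : Int} {U : Nat} :
    ∀ (ps : List (Bool × (Int × Int))) (v' : List (Int × Int)),
      unvis height width v' + 1 ≤ U →
      (∀ p ∈ ps, p.1 = true ↔ (0 ≤ p.2.1 ∧ p.2.1 < height ∧ 0 ≤ p.2.2 ∧ p.2.2 < width)) →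
      ps.foldl (stepAfn board height width U) v' =
        (ps.map Prod.snd).foldl (stepDfn board height width) v' := by
  intro ps
  induction ps with
  | nil => intro v' _ _; rfl
  | cons p ps ih =>
    intro v' hle hok
    obtain ⟨b, n⟩ := p
    obtain ⟨i', j'⟩ := n
    have e1 : stepAfn board height width U v' (b, (i', j')) = stepDfn board height width v' (i', j') :=
      stepA_eq_stepD b i' j' v' hle (hok (b, (i', j')) (by simp))
    have hle' : unvis height width (stepDfn board height width v' (i', j')) + 1 ≤ U := by
      have : unvis height width (stepDfn board height width v' (i', j')) ≤ unvis height width v' :=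
        unvis_mono (fun x hx => stepDfn_mono hx)
      omega
    calc ((b, (i', j')) :: ps).foldl (stepAfn board height width U) v'
        = ps.foldl (stepAfn board height width U) (stepDfn board height width v' (i', j')) := by
          rw [List.foldl_cons, e1]
      _ = (ps.map Prod.snd).foldl (stepDfn board height width) (stepDfn board height width v' (i', j')) :=
          ih _ hle' (fun q hq => hok q (by simp [hq]))
      _ = _ := by rw [List.map_cons, List.foldl_cons]

lemma dfsA_eq_foldD_neigh {board : String} {height width : Int} {c : Int × Int} {v : List (Int × Int)}
    (hg : openC board height width c = true) (hc : v.contains c = false) :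
    dfsA board height width (unvis height width v + 1) c.1 c.2 v =
      foldD board height width (v ++ [c]) (neighC board height width c) := by
  obtain ⟨i, j⟩ := c
  rw [openC_iff] at hg
  obtain ⟨h1, h2, h3, h4, hat⟩ := hg
  have hin : (i, j) ∈ gridL height width := mem_gridL.mpr ⟨⟨h1, h2⟩, ⟨h3, h4⟩⟩
  have hu0 : unvis height width (v ++ [(i, j)]) + 1 ≤ unvis height width v :=
    unvis_append_lt hin hc
  rw [dfsA_succ_eq_foldl, foldD_eq_foldl_stepDfn]
  have := chainA_eq_chainD (board := board) (height := height) (width := width)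
    (U := unvis height width v)
    [(decide (0 < i), (i-1, j)), (decide (0 < j), (i, j-1)),
     (decide (i < height - 1), (i+1, j)), (decide (j < width - 1), (i, j+1))]
    (v ++ [(i, j)]) hu0 ?_
  · simpa using this
  · intro p hp
    simp only [List.mem_cons, List.not_mem_nil, or_false] at hp
    rcases hp with rfl | rfl | rfl | rfl <;> simp <;> omega

lemma flood_eq_foldD {board : String} {height width : Int} :
    ∀ (m : Nat) (s : List (Int × Int)) (v : List (Int × Int)) (f : Nat),
      5 * unvis height width v + s.length ≤ m → m < f →
      (∀ c ∈ s, openC board height width c = true) →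
      floodC board height width f s v = foldD board height width v s := by
  intro m
  induction m with
  | zero =>
    intro s v f hm hf _
    have hs0 : s = [] := List.eq_nil_of_length_eq_zero (by omega)
    subst hs0
    obtain ⟨f', rfl⟩ : ∃ n, f = n + 1 := ⟨f - 1, by omega⟩
    rfl
  | succ m ih =>
    intro s v f hm hf hs
    cases s with
    | nil =>
      obtain ⟨f', rfl⟩ : ∃ n, f = n + 1 := ⟨f - 1, by omega⟩
      rfl
    | cons c s' =>
      obtain ⟨f', rfl⟩ : ∃ n, f = n + 1 := ⟨f - 1, by omega⟩
      have hfm : m < f' := by omega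
      by_cases hc : v.contains c = true
      · have e : floodC board height width (f'+1) (c :: s') v = floodC board height width f' s' v := by
          simp only [floodC, hc, if_true]
        rw [e, ih s' v f' (by simp at hm ⊢; omega) hfm (fun x hx => hs x (List.mem_cons_of_mem _ hx))]
        simp only [foldD, List.foldl_cons, hc, if_true]
      · rw [Bool.not_eq_true] at hc
        have hgc : openC board height width c = true := hs c (by simp)
        have hin : c ∈ gridL height width := by
          obtain ⟨i, j⟩ := c
          rw [openC_iff] at hgc
          exact mem_gridL.mpr ⟨⟨hgc.1, hgc.2.1⟩, ⟨hgc.2.2.1, hgc.2.2.2.1⟩⟩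
        have hlt : unvis height width (v ++ [c]) < unvis height width v := unvis_append_lt hin hc
        have hadd : PySem.Set.add v c = v ++ [c] := by
          rw [PySem.Set.add, if_neg (by simpa using hc)]
        have e : floodC board height width (f'+1) (c :: s') v =
            floodC board height width f' (neighC board height width c ++ s') (v ++ [c]) := by
          simp only [floodC, hc, Bool.false_eq_true, if_false, hadd]
        have hnlen : (neighC board height width c).length ≤ 4 := by
          have := List.length_filter_le (openC board height width)
            [(c.1 - 1, c.2), (c.1, c.2 - 1), (c.1 + 1, c.2), (c.1, c.2 + 1)]
          simpa [neighC] using this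
        have hmeas : 5 * unvis height width (v ++ [c]) + (neighC board height width c ++ s').length ≤ m := by
          simp only [List.length_append] at *
          simp only [List.length_cons] at hm
          omega
        have hgood : ∀ x ∈ neighC board height width c ++ s', openC board height width x = true := by
          intro x hx
          rcases List.mem_append.mp hx with hx | hx
          · exact (List.mem_filter.mp hx).2
          · exact hs x (List.mem_cons_of_mem _ hx)
        rw [e, ih _ _ f' hmeas hfm hgood]
        have hsplit : foldD board height width (v ++ [c]) (neighC board height width c ++ s') =
            foldD board height width (foldD board height width (v ++ [c]) (neighC board height width c)) s' := by
          simp only [foldD, List.foldl_append]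
        rw [hsplit, ← dfsA_eq_foldD_neigh hgc hc]
        simp only [foldD, List.foldl_cons, hc, Bool.false_eq_true, if_false]

-- the flood fill with B's fuel equals A's recursive dfs with A's fuel
lemma floodC_eq_dfsA {board : String} {height width : Int} {i j : Int} {v : List (Int × Int)}
    (hg : openC board height width (i, j) = true) (hc : v.contains (i, j) = false) :
    floodC board height width (5 * (height.toNat * width.toNat) + 2) [(i, j)] v =
      dfsA board height width (height.toNat * width.toNat + 1) i j v := by
  have hu := unvis_le height width v
  rw [flood_eq_foldD (5 * unvis height width v + 1) _ _ _ (by simp) (by omega)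
      (by intro x hx; simp at hx; subst hx; exact hg)]
  have e : foldD board height width v [(i, j)] =
      dfsA board height width (unvis height width v + 1) i j v := by
    simp only [foldD, List.foldl_cons, List.foldl_nil, hc, Bool.false_eq_true, if_false]
  rw [e]
  exact dfsA_fuel (unvis height width v + 1) _ _ _ _ _ le_rfl (by omega) (by omega) hg hc

-- ===== flat-index ↔ nested-loop bridge =====

lemma foldl_flatMap' {α β γ : Type} (l : List α) (f : α → List β) (g : γ → β → γ) (init : γ) :
    (l.flatMap f).foldl g init = l.foldl (fun acc a => (f a).foldl g acc) init := by
  induction l generalizing init with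
  | nil => rfl
  | cons a l ih => simp [List.foldl_append, ih]

lemma all_flatMap' {α β : Type} (l : List α) (f : α → List β) (p : β → Bool) :
    (l.flatMap f).all p = l.all (fun a => (f a).all p) := by
  induction l with
  | nil => rfl
  | cons a l ih => simp [List.all_append, ih]

lemma foldl_grid {σ : Type} (h w : Int) (g : σ → Int × Int → σ) (init : σ) :
    (PySem.List.pyRange 0 h 1).foldl (fun st i =>
      (PySem.List.pyRange 0 w 1).foldl (fun st j => g st (i, j)) st) init =
    (gridL h w).foldl g init := by
  rw [gridL, foldl_flatMap']
  simp only [List.foldl_map]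

lemma all_grid (h w : Int) (p : Int × Int → Bool) :
    (PySem.List.pyRange 0 h 1).all (fun i =>
      (PySem.List.pyRange 0 w 1).all (fun j => p (i, j))) =
    (gridL h w).all p := by
  rw [gridL, all_flatMap']
  simp only [List.all_map, Function.comp_def]

lemma flat_range_aux (m k : Nat) :
    PySem.List.pyRange 0 ((m : Int) * (k : Int)) 1 =
      (PySem.List.pyRange 0 (m : Int) 1).flatMap
        (fun i => (PySem.List.pyRange 0 (k : Int) 1).map (fun j => i * (k : Int) + j)) := by
  induction m with
  | zero => simp [PySem.List.pyRange_one_eq_nil]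
  | succ m ih =>
    have h1 : ((m+1 : ℕ) : Int) * (k : Int) = (m : Int) * k + k := by push_cast; ring
    have h2 : ((m+1 : ℕ) : Int) = (m : Int) + 1 := by push_cast; ring
    have h0 : (0 : Int) ≤ (m : Int) * k := by positivity
    have hk : (m : Int) * k ≤ (m : Int) * k + k := by
      have : (0 : Int) ≤ (k : Int) := by positivity
      omega
    rw [h1, h2,
        PySem.List.pyRange_one_append 0 ((m : Int) * k) ((m : Int) * k + k) h0 hk,
        PySem.List.pyRange_one_succ_right (by positivity : (0 : Int) ≤ (m : Int)),
        List.flatMap_append, ih]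
    congr 1
    simp only [List.flatMap_cons, List.flatMap_nil, List.append_nil]
    rw [PySem.List.pyRange_one ((m : Int) * k) ((m : Int) * k + k), PySem.List.pyRange_one 0 (k : Int)]
    simp [List.map_map, Function.comp, add_sub_cancel_left]

lemma flat_range_eq (height width : Int) (hw : 0 < width) :
    PySem.List.pyRange 0 (height * width) 1 =
      (gridL height width).map (fun c => c.1 * width + c.2) := by
  by_cases hh : height ≤ 0
  · have h1 : height * width ≤ 0 := by nlinarith
    rw [PySem.List.pyRange_one_eq_nil h1, gridL, PySem.List.pyRange_one_eq_nil hh]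
    rfl
  · have hh' : (0:Int) ≤ height := by omega
    lift height to ℕ using hh' with m
    lift width to ℕ using hw.le with k
    rw [flat_range_aux m k, gridL]
    simp [List.map_flatMap, List.map_map, Function.comp_def]

lemma fdiv_flat (i j w : Int) (hw : 0 < w) (hj0 : 0 ≤ j) (hjw : j < w) :
    PySem.Int.floordiv (i * w + j) w = i ∧ PySem.Int.mod (i * w + j) w = j := by
  have hd : PySem.Int.floordiv (i * w + j) w = i := by
    rw [PySem.Int.floordiv_eq_iff_of_pos hw]
    constructor <;> nlinarith
  refine ⟨hd, ?_⟩
  have h := PySem.Int.floordiv_mul_add_mod (i * w + j) w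
  rw [hd] at h
  linarith

-- ===== connectivity pass =====

lemma regA_eq_regC (board : String) (height width : Int) (hw : 0 < width) :
    regA board height width = regC board height width := by
  have hA : regA board height width =
      (gridL height width).foldl (fun st c =>
        if (pvAt board (c.1*width + c.2) == '-') && !(st.2.contains c) then
          (st.1 + 1, dfsA board height width (height.toNat * width.toNat + 1) c.1 c.2 st.2)
        else st) ((0 : Int), ([] : List (Int × Int))) := by
    rw [← foldl_grid]
    rfl
  have hB : regC board height width =
      (gridL height width).foldl (fun st c =>
        if (pvAt board (c.1*width + c.2) == '-') && !(st.2.contains c) then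
          (st.1 + 1, dfsA board height width (height.toNat * width.toNat + 1) c.1 c.2 st.2)
        else st) ((0 : Int), ([] : List (Int × Int))) := by
    rw [regC, flat_range_eq height width hw, List.foldl_map]
    apply PySem.List.foldl_congr_mem
    intro st c hc
    obtain ⟨⟨hi0, hih⟩, hj0, hjw⟩ := mem_gridL.mp hc
    obtain ⟨ci, cj⟩ := c
    obtain ⟨hd, hm⟩ := fdiv_flat ci cj width hw hj0 hjw
    simp only [charB_eq, hd, hm]
    by_cases hcond : ((pvAt board (ci*width + cj) == '-') && !(st.2.contains (ci, cj))) = true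
    · rw [if_pos hcond, if_pos hcond]
      simp only [Bool.and_eq_true, Bool.not_eq_true'] at hcond
      have hg : openC board height width (ci, cj) = true := by
        rw [openC_iff]
        exact ⟨hi0, hih, hj0, hjw, hcond.1⟩
      rw [floodC_eq_dfsA hg hcond.2]
    · rw [if_neg hcond, if_neg hcond]
  rw [hA, hB]

-- ===== per-cell word predicates (A's hor/ver flags and length tests, per cell) =====

def hP (board : String) (height width : Int) (i j : Int) : Bool :=
  (j == 0 || pvAt board (i*width + j - 1) == '#') &&
  (decide (j < width - 2) && !(pvAt board (i*width + j + 1) == '-') && !(pvAt board (i*width + j + 2) == '#'))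

def vP (board : String) (height width : Int) (i j : Int) : Bool :=
  (i == 0 || pvAt board ((i-1)*width + j) == '#') &&
  (decide (i < height - 2) && !(pvAt board ((i+1)*width + j) == '-') && !(pvAt board ((i+2)*width + j) == '#'))

def pass2P (board : String) (height width : Int) : Bool :=
  (PySem.List.pyRange 0 height 1).all (fun i =>
    (PySem.List.pyRange 0 width 1).all (fun j =>
      if !(pvAt board (i*width + j) == '#') then
        hP board height width i j && vP board height width i j
      else true))

def pass3P (board : String) (height width : Int) : Bool :=
  (PySem.List.pyRange 0 height 1).all (fun i =>
    (PySem.List.pyRange 0 width 1).all (fun j =>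
      !(hP board height width i j && (pvAt board (i*width + j + 1) == '#')) &&
      !(vP board height width i j && (pvAt board ((i+1)*width + j) == '#'))))

def pass4P (board : String) (height width : Int) : Bool :=
  (PySem.List.pyRange 0 height 1).all (fun i =>
    (PySem.List.pyRange 0 width 1).all (fun j =>
      if pvAt board (i*width + j) == '#' then
        pvAt board (height*width - 1 - (i*width + j)) == '#'
      else true))

-- combined per-cell condition, matching cellOkB's shape on pair coordinates
def cellP (board : String) (height width : Int) (c : Int × Int) : Bool :=
  (!(!(pvAt board (c.1*width + c.2) == '#') &&
     !(hP board height width c.1 c.2 && vP board height width c.1 c.2))) &&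
  (!(hP board height width c.1 c.2 && (pvAt board (c.1*width + c.2 + 1) == '#'))) &&
  (!(vP board height width c.1 c.2 && (pvAt board ((c.1+1)*width + c.2) == '#'))) &&
  (!((pvAt board (c.1*width + c.2) == '#') &&
     !(pvAt board (height*width - 1 - (c.1*width + c.2)) == '#')))

lemma mem_condInsert {p : Int × Int → Bool} :
    ∀ (l : List (Int × Int)) (acc : List (Int × Int)) (x : Int × Int),
      (l.foldl (fun acc c => if p c then acc ++ [c] else acc) acc).contains x = true ↔
        (acc.contains x = true ∨ (x ∈ l ∧ p x = true)) := by
  intro l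
  induction l with
  | nil => simp
  | cons c l ih =>
    intro acc x
    rw [List.foldl_cons]
    by_cases hp : p c = true
    · rw [if_pos hp, ih]
      constructor
      · rintro (h | h)
        · simp only [List.contains_append] at h
          rcases Bool.or_eq_true_iff.mp h with h | h
          · exact Or.inl h
          · refine Or.inr ⟨?_, ?_⟩
            · simp at h
              simp [h]
            · simp at h
              subst h
              exact hp
        · exact Or.inr ⟨List.mem_cons_of_mem _ h.1, h.2⟩
      · rintro (h | ⟨hm, hx⟩)
        · exact Or.inl (by simp only [List.contains_append, h, Bool.true_or])
        · rcases List.mem_cons.mp hm with rfl | hm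
          · exact Or.inl (by simp)
          · exact Or.inr ⟨hm, hx⟩
    · rw [if_neg hp, ih]
      constructor
      · rintro (h | h)
        · exact Or.inl h
        · exact Or.inr ⟨List.mem_cons_of_mem _ h.1, h.2⟩
      · rintro (h | ⟨hm, hx⟩)
        · exact Or.inl h
        · rcases List.mem_cons.mp hm with rfl | hm
          · exact absurd hx hp
          · exact Or.inr ⟨hm, hx⟩

lemma all_congr_mem {α : Type} {l : List α} {f g : α → Bool}
    (h : ∀ x ∈ l, f x = g x) : l.all f = l.all g := by
  induction l with
  | nil => rfl
  | cons a l ih =>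
    simp only [List.all_cons]
    rw [h a (by simp), ih (fun x hx => h x (List.mem_cons_of_mem _ hx))]

-- the condition under which A sets hor_found[i][j]
def horP (board : String) (height width : Int) (c : Int × Int) : Bool :=
  !(pvAt board (c.1*width + c.2) == '#') && hP board height width c.1 c.2

def verP (board : String) (height width : Int) (c : Int × Int) : Bool :=
  !(pvAt board (c.1*width + c.2) == '#') && vP board height width c.1 c.2

lemma horA_contains (board : String) (height width : Int) (i j : Int)
    (hi : i ∈ PySem.List.pyRange 0 height 1) (hj : j ∈ PySem.List.pyRange 0 width 1) :
    (horA board height width).contains (i, j) = horP board height width (i, j) := by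
  have e : horA board height width =
      (gridL height width).foldl (fun acc c => if horP board height width c then acc ++ [c] else acc) [] := by
    rw [gridL, foldl_flatMap']
    rw [horA]
    apply PySem.List.foldl_congr_mem
    intro acc i' _
    rw [List.foldl_map]
    rfl
  rw [e]
  have hin : (i, j) ∈ gridL height width := by
    rw [PySem.List.mem_pyRange_one] at hi hj
    exact mem_gridL.mpr ⟨⟨hi.1, hi.2⟩, ⟨hj.1, hj.2⟩⟩
  by_cases hp : horP board height width (i, j) = true
  · rw [hp, (mem_condInsert _ _ _).mpr (Or.inr ⟨hin, hp⟩)]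
  · rw [Bool.not_eq_true] at hp
    rw [hp]
    rw [Bool.eq_false_iff]
    intro hcon
    rcases (mem_condInsert _ _ _).mp hcon with h | h
    · simp at h
    · rw [h.2] at hp
      exact Bool.true_eq_false.mp hp

lemma verA_contains (board : String) (height width : Int) (i j : Int)
    (hi : i ∈ PySem.List.pyRange 0 height 1) (hj : j ∈ PySem.List.pyRange 0 width 1) :
    (verA board height width).contains (i, j) = verP board height width (i, j) := by
  have e : verA board height width =
      (gridL height width).foldl (fun acc c => if verP board height width c then acc ++ [c] else acc) [] := by
    rw [gridL, foldl_flatMap']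
    rw [verA]
    apply PySem.List.foldl_congr_mem
    intro acc i' _
    rw [List.foldl_map]
    rfl
  rw [e]
  have hin : (i, j) ∈ gridL height width := by
    rw [PySem.List.mem_pyRange_one] at hi hj
    exact mem_gridL.mpr ⟨⟨hi.1, hi.2⟩, ⟨hj.1, hj.2⟩⟩
  by_cases hp : verP board height width (i, j) = true
  · rw [hp, (mem_condInsert _ _ _).mpr (Or.inr ⟨hin, hp⟩)]
  · rw [Bool.not_eq_true] at hp
    rw [hp]
    rw [Bool.eq_false_iff]
    intro hcon
    rcases (mem_condInsert _ _ _).mp hcon with h | h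
    · simp at h
    · rw [h.2] at hp
      exact Bool.true_eq_false.mp hp

lemma pass2A_eq_pass2P (board : String) (height width : Int) :
    pass2A board height width = pass2P board height width := by
  rw [pass2A, pass2P]
  apply all_congr_mem
  intro i hi
  apply all_congr_mem
  intro j hj
  rw [horA_contains board height width i j hi hj, verA_contains board height width i j hi hj]
  by_cases hsharp : (pvAt board (i*width + j) == '#') = true
  · simp [hsharp]
  · rw [Bool.not_eq_true] at hsharp
    simp only [hsharp, Bool.not_false, if_true, horP, verP, Bool.true_and]

lemma scanA_ge (ok : Int → Bool) : ∀ (ks : List Int) (len : Int), len ≤ scanA ok ks len := by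
  intro ks
  induction ks with
  | nil => intro len; simp [scanA]
  | cons k ks ih =>
    intro len
    rw [scanA]
    split
    · calc len ≤ len + 1 := by omega
        _ ≤ _ := ih (len + 1)
    · exact le_rfl

lemma scanA_lt3 (ok : Int → Bool) (j lim : Int) (hj : j < lim - 2) (h2 : ok (j+2) = true) :
    scanA ok (PySem.List.pyRange (j+1) lim 1) 1 < 3 ↔ ok (j+1) = false := by
  rw [PySem.List.pyRange_one_cons (by omega : j + 1 < lim), scanA]
  by_cases h1 : ok (j+1) = true
  · rw [if_pos h1, (by ring : j + 1 + 1 = j + 2),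
        PySem.List.pyRange_one_cons (by omega : j + 2 < lim), scanA, if_pos h2,
        (by ring : j + 2 + 1 = j + 3), (by norm_num : (1:Int) + 1 + 1 = 3)]
    have h3 := scanA_ge ok (PySem.List.pyRange (j+3) lim 1) 3
    constructor
    · intro h; omega
    · intro h; rw [h1] at h; exact absurd h (by simp)
  · rw [if_neg h1]
    rw [Bool.not_eq_true] at h1
    simp [h1]

lemma pass3A_eq_pass3P (board : String) (height width : Int) :
    pass3A board height width = pass3P board height width := by
  rw [pass3A, pass3P]
  apply all_congr_mem
  intro i _
  apply all_congr_mem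
  intro j _
  have hfst : (if (j == 0 || pvAt board (i*width + j - 1) == '#') &&
          (decide (j < width - 2) && !(pvAt board (i*width + j + 1) == '-') && !(pvAt board (i*width + j + 2) == '#')) then
         decide (¬ (scanA (fun k => !(pvAt board (i*width + k) == '#')) (PySem.List.pyRange (j+1) width 1) 1 < 3))
       else true)
      = !(hP board height width i j && (pvAt board (i*width + j + 1) == '#')) := by
    by_cases hh : hP board height width i j = true
    · rw [if_pos (by rw [hP] at hh; exact hh), hh, Bool.true_and]
      have hh' := hh
      rw [hP, Bool.and_eq_true, Bool.and_eq_true, Bool.and_eq_true] at hh'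
      have hlt : j < width - 2 := of_decide_eq_true hh'.2.1.1
      have h2 : (pvAt board (i*width + j + 2) == '#') = false := by
        have := hh'.2.2
        rwa [Bool.not_eq_true'] at this
      have hscan := scanA_lt3 (fun k => !(pvAt board (i*width + k) == '#')) j width hlt
        (by show (!(pvAt board (i*width + (j+2)) == '#')) = true
            rw [(by ring : i*width + (j+2) = i*width + j + 2), h2, Bool.not_false])
      by_cases hat : (pvAt board (i*width + j + 1) == '#') = true
      · have hlt3 : scanA (fun k => !(pvAt board (i*width + k) == '#')) (PySem.List.pyRange (j+1) width 1) 1 < 3 := by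
          apply hscan.mpr
          show (!(pvAt board (i*width + (j+1)) == '#')) = false
          rw [(by ring : i*width + (j+1) = i*width + j + 1), hat, Bool.not_true]
        simp [hlt3, hat]
      · rw [Bool.not_eq_true] at hat
        have hge3 : ¬ scanA (fun k => !(pvAt board (i*width + k) == '#')) (PySem.List.pyRange (j+1) width 1) 1 < 3 := by
          intro hlt3
          have hthis : (!(pvAt board (i*width + (j+1)) == '#')) = false := hscan.mp hlt3
          rw [Bool.not_eq_false'] at hthis
          rw [(by ring : i*width + (j+1) = i*width + j + 1), hat] at hthis
          exact Bool.false_ne_true hthis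
        simp [hge3, hat]
    · rw [if_neg (by rw [hP] at hh; exact hh)]
      rw [Bool.not_eq_true] at hh
      rw [hh]
      rfl
  have hsnd : (if (i == 0 || pvAt board ((i-1)*width + j) == '#') &&
          (decide (i < height - 2) && !(pvAt board ((i+1)*width + j) == '-') && !(pvAt board ((i+2)*width + j) == '#')) then
         decide (¬ (scanA (fun k => !(pvAt board (k*width + j) == '#')) (PySem.List.pyRange (i+1) height 1) 1 < 3))
       else true)
      = !(vP board height width i j && (pvAt board ((i+1)*width + j) == '#')) := by
    by_cases hh : vP board height width i j = true
    · rw [if_pos (by rw [vP] at hh; exact hh), hh, Bool.true_and]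
      have hh' := hh
      rw [vP, Bool.and_eq_true, Bool.and_eq_true, Bool.and_eq_true] at hh'
      have hlt : i < height - 2 := of_decide_eq_true hh'.2.1.1
      have h2 : (pvAt board ((i+2)*width + j) == '#') = false := by
        have := hh'.2.2
        rwa [Bool.not_eq_true'] at this
      have hscan := scanA_lt3 (fun k => !(pvAt board (k*width + j) == '#')) i height hlt
        (by show (!(pvAt board ((i+2)*width + j) == '#')) = true
            rw [h2, Bool.not_false])
      by_cases hat : (pvAt board ((i+1)*width + j) == '#') = true
      · have hlt3 : scanA (fun k => !(pvAt board (k*width + j) == '#')) (PySem.List.pyRange (i+1) height 1) 1 < 3 := by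
          apply hscan.mpr
          show (!(pvAt board ((i+1)*width + j) == '#')) = false
          rw [hat, Bool.not_true]
        simp [hlt3, hat]
      · rw [Bool.not_eq_true] at hat
        have hge3 : ¬ scanA (fun k => !(pvAt board (k*width + j) == '#')) (PySem.List.pyRange (i+1) height 1) 1 < 3 := by
          intro hlt3
          have hthis : (!(pvAt board ((i+1)*width + j) == '#')) = false := hscan.mp hlt3
          rw [Bool.not_eq_false'] at hthis
          rw [hat] at hthis
          exact Bool.false_ne_true hthis
        simp [hge3, hat]
    · rw [if_neg (by rw [vP] at hh; exact hh)]
      rw [Bool.not_eq_true] at hh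
      rw [hh]
      rfl
  rw [hfst, hsnd]

lemma pass4A_eq_pass4P (board : String) (height width : Int) :
    pass4A board height width = pass4P board height width := by
  rw [pass4A, pass4P]
  apply all_congr_mem
  intro i _
  apply all_congr_mem
  intro j _
  have e : (height - 1 - i)*width + (width - 1 - j) = height*width - 1 - (i*width + j) := by ring
  rw [e]

-- ===== assembling the flat pass =====

lemma all_and {α : Type} (l : List α) (f g : α → Bool) :
    l.all (fun x => f x && g x) = (l.all f && l.all g) := by
  induction l with
  | nil => rfl
  | cons a l ih =>
    simp only [List.all_cons, ih]
    cases f a <;> cases g a <;> simp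

lemma cellOkB_flat (board : String) (height width : Int) (hw : 0 < width) (i j : Int)
    (hj0 : 0 ≤ j) (hjw : j < width) :
    cellOkB board height width (i * width + j) = cellP board height width (i, j) := by
  obtain ⟨hd, hm⟩ := fdiv_flat i j width hw hj0 hjw
  have e1 : i * width + j - width = (i - 1) * width + j := by ring
  have e2 : i * width + j + width = (i + 1) * width + j := by ring
  have e3 : i * width + j + 2 * width = (i + 2) * width + j := by ring
  simp only [cellOkB, cellP, hP, vP, charB_eq, hd, hm, e1, e2, e3]

lemma pass2P_grid (board : String) (height width : Int) :
    pass2P board height width =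
      (gridL height width).all (fun c =>
        if !(pvAt board (c.1*width + c.2) == '#') then
          hP board height width c.1 c.2 && vP board height width c.1 c.2
        else true) := by
  rw [pass2P, ← all_grid]

lemma pass3P_grid (board : String) (height width : Int) :
    pass3P board height width =
      (gridL height width).all (fun c =>
        !(hP board height width c.1 c.2 && (pvAt board (c.1*width + c.2 + 1) == '#')) &&
        !(vP board height width c.1 c.2 && (pvAt board ((c.1+1)*width + c.2) == '#'))) := by
  rw [pass3P, ← all_grid]

lemma pass4P_grid (board : String) (height width : Int) :
    pass4P board height width =
      (gridL height width).all (fun c =>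
        if pvAt board (c.1*width + c.2) == '#' then
          pvAt board (height*width - 1 - (c.1*width + c.2)) == '#'
        else true) := by
  rw [pass4P, ← all_grid]

lemma passes_eq (board : String) (height width : Int) (hw : 0 < width) :
    (pass2A board height width && pass3A board height width && pass4A board height width) =
      (PySem.List.pyRange 0 (height*width) 1).all (cellOkB board height width) := by
  rw [flat_range_eq height width hw, List.all_map]
  have h1 : (gridL height width).all (cellOkB board height width ∘ fun c => c.1 * width + c.2) =
      (gridL height width).all (cellP board height width) := by
    apply all_congr_mem
    intro c hc
    obtain ⟨⟨_, _⟩, hj0, hjw⟩ := mem_gridL.mp hc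
    obtain ⟨ci, cj⟩ := c
    simpa [Function.comp] using cellOkB_flat board height width hw ci cj hj0 hjw
  rw [h1, pass2A_eq_pass2P, pass3A_eq_pass3P, pass4A_eq_pass4P,
      pass2P_grid, pass3P_grid, pass4P_grid, ← all_and, ← all_and]
  apply all_congr_mem
  intro c _
  simp only [cellP]
  cases h1 : pvAt board (c.1*width + c.2) == '#' <;>
    cases h2 : hP board height width c.1 c.2 <;>
      cases h3 : vP board height width c.1 c.2 <;> simp

-- ===== degenerate dimensions =====

lemma valid_trivial (board : String) (height width : Int) (hw : width ≤ 0) :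
    valid_original board height width = true := by
  have hnil : PySem.List.pyRange 0 width 1 = [] := PySem.List.pyRange_one_eq_nil hw
  simp [valid_original, regA, pass2A, pass3A, pass4A, hnil]

lemma alt_trivial (board : String) (height width : Int) (hn : height * width ≤ 0) :
    valid_original_alt board height width = true := by
  simp [valid_original_alt, regC, PySem.List.pyRange_one_eq_nil hn]

-- ===== VERDICT (by name: the statement is the Claim_ definition above) =====
theorem valid_original_spec : Claim_equal_valid_original := by
  intro board height width _ hpre
  unfold Spec_valid_original
  by_cases hw : 0 < width
  · show (if (regA board height width).1 > 1 then false
          else pass2A board height width && pass3A board height width && pass4A board height width) =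
        valid_original_alt board height width
    unfold valid_original_alt
    rw [regA_eq_regC board height width hw, passes_eq board height width hw]
  · have hw' : width ≤ 0 := by omega
    have hn : height * width ≤ 0 := by
      rcases hpre.2 with hh | hww
      · nlinarith
      · have : width = 0 := le_antisymm hw' hww
        simp [this]
    rw [valid_trivial board height width hw', alt_trivial board height width hn]
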